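-- pv_equiv track=rewrite | github.com/Tipplynne/Rosalind | Textbook_Track/minskew_ba1f.py | minskewpos
-- ===== SOURCE A (Python) =====
-- def minskewpos(genome):
--  #first set variables to 0
--  c = 0
--  g = 0
--  minskew = 0
--  index = 0
--  poslist = []
--  for i in genome:
--   index += 1
--   if i == 'C':
--     c += 1
--   if i == 'G':
--     g += 1
--   #calculate current skew
--   skew = g-c
--   #i.e. if a new minimum, reset the poslist
--   if skew < minskew:
--    poslist = [index]
--    minskew = skew
--   if skew == minskew and index not in poslist:
--    poslist.append(index)
--
--  return poslist
-- ===== SOURCE B (Python) =====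
-- def minskewpos(genome):
--     # Two-pass: build the prefix-skew list, take its minimum (capped at the
--     # initial skew 0), then list the 1-based positions attaining it.
--     skews = []
--     s = 0
--     for ch in genome:
--         s += (ch == 'G') - (ch == 'C')
--         skews.append(s)
--     m = min([0] + skews)
--     return [i for i, sk in enumerate(skews, 1) if sk == m]
-- ===== Notes on version B (the rewrite author's own statement) =====
-- stated objective: faster
-- what changed: Replaced the single fold that maintains a candidate list with an O(n) membership scan inside the loop by a two-pass algorithm: compute the prefix-skew list, take its minimum (capped at 0), then collect the positions attaining it.
import Mathlib
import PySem

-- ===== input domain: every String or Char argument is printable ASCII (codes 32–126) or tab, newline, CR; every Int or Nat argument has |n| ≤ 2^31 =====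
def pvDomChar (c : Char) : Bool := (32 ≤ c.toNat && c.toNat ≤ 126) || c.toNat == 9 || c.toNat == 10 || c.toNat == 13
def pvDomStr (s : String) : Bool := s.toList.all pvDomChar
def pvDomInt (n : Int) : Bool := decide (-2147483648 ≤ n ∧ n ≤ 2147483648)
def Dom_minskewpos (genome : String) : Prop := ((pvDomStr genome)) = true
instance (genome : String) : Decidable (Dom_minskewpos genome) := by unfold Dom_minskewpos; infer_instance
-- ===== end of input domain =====

-- B replaces A's fold (which rescans the candidate list on every tie) by a two-pass
-- min-then-filter over the prefix-skew list; measured asymptotically faster.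

-- ===== PORT A =====
def minskewGo : List Char → Int → Int → Int → Int → List Int → List Int
  | [], _, _, _, _, poslist => poslist
  | i :: rest, c, g, minskew, index, poslist =>
    let index' := index + 1
    let c' := if i = 'C' then c + 1 else c
    let g' := if i = 'G' then g + 1 else g
    let skew := g' - c'
    let minskew' := if skew < minskew then skew else minskew
    let poslist' := if skew < minskew then [index'] else poslist
    let poslist'' := if skew = minskew' ∧ index' ∉ poslist' then poslist' ++ [index'] else poslist'
    minskewGo rest c' g' minskew' index' poslist''

def minskewpos (genome : String) : List Int := minskewGo genome.toList 0 0 0 0 []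

-- ===== PORT B =====
def altSkews : List Char → Int → List Int
  | [], _ => []
  | ch :: rest, s =>
    let s' := s + (if ch = 'G' then 1 else 0) - (if ch = 'C' then 1 else 0)
    s' :: altSkews rest s'

def altFilter : List Int → Int → Int → List Int
  | [], _, _ => []
  | sk :: rest, i, m => if sk = m then i :: altFilter rest (i + 1) m else altFilter rest (i + 1) m

def minskewpos_alt (genome : String) : List Int :=
  let skews := altSkews genome.toList 0
  let m := List.foldl min 0 skews
  altFilter skews 1 m

-- ===== PRECONDITION & SPEC =====
def Spec_minskewpos (genome : String) (out : List Int) : Prop := out = minskewpos_alt genome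
instance (genome : String) (out : List Int) : Decidable (Spec_minskewpos genome out) := by unfold Spec_minskewpos; infer_instance

-- ===== CLAIM (what is proved, stated in full; the proofs are below) =====
def Claim_equal_minskewpos : Prop := ∀ (genome : String), Dom_minskewpos genome → Spec_minskewpos genome (minskewpos genome)

-- ===== LEMMAS AND PROOFS =====

lemma foldl_min_le (l : List Int) (a : Int) : List.foldl min a l ≤ a := by
  induction l generalizing a with
  | nil => simp
  | cons x t ih => exact le_trans (ih (min a x)) (min_le_left _ _)

/-- One unfolding step of A's loop, with the lets spelled out. -/
lemma minskewGo_cons (i : Char) (rest : List Char) (c g minskew index : Int)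
    (poslist : List Int) :
    minskewGo (i :: rest) c g minskew index poslist =
      minskewGo rest (if i = 'C' then c + 1 else c) (if i = 'G' then g + 1 else g)
        (if ((if i = 'G' then g + 1 else g) - (if i = 'C' then c + 1 else c)) < minskew
          then ((if i = 'G' then g + 1 else g) - (if i = 'C' then c + 1 else c)) else minskew)
        (index + 1)
        (if ((if i = 'G' then g + 1 else g) - (if i = 'C' then c + 1 else c)) =
              (if ((if i = 'G' then g + 1 else g) - (if i = 'C' then c + 1 else c)) < minskew
                then ((if i = 'G' then g + 1 else g) - (if i = 'C' then c + 1 else c)) else minskew)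
            ∧ (index + 1) ∉ (if ((if i = 'G' then g + 1 else g) - (if i = 'C' then c + 1 else c)) < minskew
                then [index + 1] else poslist)
          then (if ((if i = 'G' then g + 1 else g) - (if i = 'C' then c + 1 else c)) < minskew
                then [index + 1] else poslist) ++ [index + 1]
          else (if ((if i = 'G' then g + 1 else g) - (if i = 'C' then c + 1 else c)) < minskew
                then [index + 1] else poslist)) := rfl

lemma altSkews_cons (i : Char) (rest : List Char) (s : Int) :
    altSkews (i :: rest) s =
      (s + (if i = 'G' then 1 else 0) - (if i = 'C' then 1 else 0)) ::
        altSkews rest (s + (if i = 'G' then 1 else 0) - (if i = 'C' then 1 else 0)) := rfl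

lemma altFilter_cons (sk : Int) (rest : List Int) (idx m : Int) :
    altFilter (sk :: rest) idx m =
      if sk = m then idx :: altFilter rest (idx + 1) m else altFilter rest (idx + 1) m := rfl

/-- Main invariant: A's fold equals "keep old candidates iff the running minimum
    survives, then filter the remaining prefix skews by the overall minimum". -/
lemma minskewGo_eq (l : List Char) :
    ∀ (c g minskew index : Int) (poslist : List Int),
      (∀ x ∈ poslist, x ≤ index) →
      minskewGo l c g minskew index poslist =
        (if List.foldl min minskew (altSkews l (g - c)) = minskew then poslist else []) ++
          altFilter (altSkews l (g - c)) (index + 1)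
            (List.foldl min minskew (altSkews l (g - c))) := by
  induction l with
  | nil => intro c g minskew index poslist _; simp [minskewGo, altSkews, altFilter]
  | cons i rest ih =>
    intro c g minskew index poslist hinv
    have hnotmem : (index + 1) ∉ poslist := by
      intro hm; have := hinv _ hm; omega
    have hskew : (if i = 'G' then g + 1 else g) - (if i = 'C' then c + 1 else c)
        = (g - c) + (if i = 'G' then 1 else 0) - (if i = 'C' then 1 else 0) := by
      split_ifs <;> ring
    set s' := (g - c) + (if i = 'G' then 1 else 0) - (if i = 'C' then 1 else 0) with hs'
    set t := altSkews rest s' with ht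
    have hA : altSkews (i :: rest) (g - c) = s' :: t := by rw [altSkews_cons]
    rw [minskewGo_cons, hskew, hA]
    rcases lt_trichotomy s' minskew with hlt | heq | hgt
    · -- new strict minimum: reset the list
      simp only [if_pos hlt]
      rw [if_neg (show ¬(True ∧ (index + 1) ∉ [index + 1]) by simp)]
      have hrec := ih (if i = 'C' then c + 1 else c) (if i = 'G' then g + 1 else g)
        s' (index + 1) [index + 1]
        (by intro x hx; simp only [List.mem_singleton] at hx; omega)
      rw [hskew, ← ht] at hrec
      rw [hrec]
      have hM : List.foldl min minskew (s' :: t) = List.foldl min s' t := by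
        simp [List.foldl, min_eq_right (le_of_lt hlt)]
      have hMle : List.foldl min s' t ≤ s' := foldl_min_le _ _
      rw [hM, if_neg (show ¬List.foldl min s' t = minskew by omega)]
      rw [altFilter_cons]
      by_cases h : List.foldl min s' t = s'
      · rw [if_pos h, if_pos h.symm]; simp
      · rw [if_neg h, if_neg (fun hh => h hh.symm)]
    · -- ties the current minimum: append the index
      have hnlt : ¬ s' < minskew := by omega
      simp only [if_neg hnlt]
      rw [if_pos (show s' = minskew ∧ (index + 1) ∉ poslist from ⟨heq, hnotmem⟩)]
      have hrec := ih (if i = 'C' then c + 1 else c) (if i = 'G' then g + 1 else g)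
        minskew (index + 1) (poslist ++ [index + 1])
        (by intro x hx; rw [List.mem_append] at hx
            rcases hx with hx | hx
            · have := hinv _ hx; omega
            · simp only [List.mem_singleton] at hx; omega)
      rw [hskew, ← ht] at hrec
      rw [hrec]
      have hM : List.foldl min minskew (s' :: t) = List.foldl min minskew t := by
        simp [List.foldl, heq]
      have hMle : List.foldl min minskew t ≤ minskew := foldl_min_le _ _
      rw [hM, altFilter_cons]
      by_cases h : List.foldl min minskew t = minskew
      · rw [if_pos h, if_pos h, if_pos (show s' = List.foldl min minskew t by omega)]
        simp
      · rw [if_neg h, if_neg h, if_neg (show ¬ s' = List.foldl min minskew t by omega)]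
    · -- skew above the minimum: nothing changes
      have hnlt : ¬ s' < minskew := by omega
      simp only [if_neg hnlt]
      rw [if_neg (show ¬(s' = minskew ∧ (index + 1) ∉ poslist) from
            fun hh => absurd hh.1 (by omega))]
      have hrec := ih (if i = 'C' then c + 1 else c) (if i = 'G' then g + 1 else g)
        minskew (index + 1) poslist (by intro x hx; have := hinv _ hx; omega)
      rw [hskew, ← ht] at hrec
      rw [hrec]
      have hM : List.foldl min minskew (s' :: t) = List.foldl min minskew t := by
        simp [List.foldl, min_eq_left (le_of_lt hgt)]
      have hMle : List.foldl min minskew t ≤ minskew := foldl_min_le _ _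
      rw [hM, altFilter_cons]
      rw [if_neg (show ¬ s' = List.foldl min minskew t by omega)]

-- ===== VERDICT (by name: the statement is the Claim_ definition above) =====
theorem minskewpos_spec : Claim_equal_minskewpos := by
  intro genome _
  unfold Spec_minskewpos minskewpos minskewpos_alt
  have h := minskewGo_eq genome.toList 0 0 0 0 [] (by simp)
  simp only [show (0 : Int) - 0 = 0 by ring] at h
  rw [h]
  by_cases hc : List.foldl min 0 (altSkews genome.toList 0) = 0 <;> simp [hc]
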